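-- pv_equiv track=rewrite | github.com/PARK-se-ung/Algorithm | 백준/Bronze/1292. 쉽게 푸는 문제/쉽게 푸는 문제.py | func
-- ===== SOURCE A (Python) =====
-- def func(x):
--     if x <= 1: return x
--     result = 0
--     t = 1
--     while x > 0:
--         if x < t:
--             result += t * x
--             break
--         result += t ** 2
--         x -= t
--         t += 1
--
--     return result
-- ===== SOURCE B (Python) =====
-- def tri(n):
--     return n * (n + 1) // 2
--
--
-- def func(x):
--     # O(log x): find the group index m (largest m with tri(m) <= x) by
--     # galloping + binary search on triangular numbers, then use the
--     # closed-form sum of squares for the full groups.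
--     if x <= 1:
--         return x
--     lo, hi = 1, 2
--     while tri(hi) <= x:
--         hi *= 2
--     while hi - lo > 1:
--         mid = (lo + hi) // 2
--         if tri(mid) <= x:
--             lo = mid
--         else:
--             hi = mid
--     m = lo
--     return m * (m + 1) * (2 * m + 1) // 6 + (m + 1) * (x - tri(m))
-- ===== Notes on version B (the rewrite author's own statement) =====
-- stated objective: faster
-- what changed: Replaces the term-by-term while loop (subtract t, add t^2, O(sqrt(x)) iterations) by a galloping + binary search for the group index on triangular numbers plus the closed-form sum-of-squares formula, O(log x).
import Mathlib
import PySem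

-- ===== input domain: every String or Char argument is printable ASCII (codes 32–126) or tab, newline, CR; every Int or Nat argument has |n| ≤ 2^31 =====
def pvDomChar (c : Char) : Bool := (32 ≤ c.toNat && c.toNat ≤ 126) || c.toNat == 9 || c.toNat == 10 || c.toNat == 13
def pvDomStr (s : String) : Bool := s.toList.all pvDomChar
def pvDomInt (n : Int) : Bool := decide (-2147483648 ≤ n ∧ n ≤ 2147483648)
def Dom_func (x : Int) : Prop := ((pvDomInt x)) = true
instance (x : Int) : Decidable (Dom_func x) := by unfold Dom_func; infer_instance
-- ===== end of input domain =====

-- B replaces A's O(√x) term-by-term loop by a galloping + binary search for the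
-- group index over triangular numbers plus the closed-form sum of squares (O(log x)).

-- ===== PORT A =====
-- the while loop of A: state (x, t, result)
def funcLoop (x t result : Int) : Int :=
  if h1 : 0 < x then
    if h2 : x < t then result + t * x
    else funcLoop (x - t) (t + 1) (result + t ^ 2)
  else result
termination_by ((1 - t).toNat, x.toNat)
decreasing_by simp only [Prod.lex_def]; omega

def func (x : Int) : Int :=
  if x ≤ 1 then x else funcLoop x 1 0

-- ===== PORT B =====
-- Source B helper tri(n) = n*(n+1)//2
def tri (n : Int) : Int := PySem.Int.floordiv (n * (n + 1)) 2

-- needed by gallop's termination proof (cited in decreasing_by)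
theorem tri_two (n : Int) : 2 * tri n = n * (n + 1) := by
  have h : (2 : Int) ∣ n * (n + 1) := (Int.even_mul_succ_self n).two_dvd
  unfold tri
  rw [PySem.Int.floordiv_eq_ediv_of_pos (by norm_num)]
  exact Int.mul_ediv_cancel' h

theorem self_le_tri {n : Int} (h : 1 ≤ n) : n ≤ tri n := by
  have h2 := tri_two n
  nlinarith

-- Source B helper sumsq(m) = m*(m+1)*(2*m+1)//6
def sumsq (m : Int) : Int := PySem.Int.floordiv (m * (m + 1) * (2 * m + 1)) 6

-- first while loop of Source B: double hi while tri(hi) <= x.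
-- The '0 < hi' guard only makes the definition total (Source B only ever calls it
-- with hi = 2, where the guard always holds along the recursion).
def gallop (x hi : Int) : Int :=
  if _h : 0 < hi ∧ tri hi ≤ x then gallop x (2 * hi) else hi
termination_by (x + 1 - hi).toNat
decreasing_by
  have hle : hi ≤ tri hi := self_le_tri (by omega)
  omega

-- second while loop of Source B: binary search, invariant tri(lo) <= x < tri(hi)
def bsearch (x lo hi : Int) : Int :=
  if h : 1 < hi - lo then
    let mid := PySem.Int.floordiv (lo + hi) 2
    if tri mid ≤ x then bsearch x mid hi else bsearch x lo mid
  else lo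
termination_by (hi - lo).toNat
decreasing_by
  all_goals
    have hm : PySem.Int.floordiv (lo + hi) 2 = (lo + hi) / 2 :=
      PySem.Int.floordiv_eq_ediv_of_pos (by norm_num)
  all_goals simp only [hm]; omega

def func_alt (x : Int) : Int :=
  if x ≤ 1 then x
  else
    let hi := gallop x 2
    let m := bsearch x 1 hi
    sumsq m + (m + 1) * (x - tri m)

-- ===== PRECONDITION & SPEC =====
def Spec_func (x : Int) (out : Int) : Prop := out = func_alt x
instance (x : Int) (out : Int) : Decidable (Spec_func x out) := by unfold Spec_func; infer_instance

-- ===== CLAIM (what is proved, stated in full; the proofs are below) =====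
def Claim_equal_func : Prop := ∀ (x : Int), Dom_func x → Spec_func x (func x)

-- ===== LEMMAS AND PROOFS =====

theorem tri_succ (n : Int) : tri (n + 1) = tri n + (n + 1) := by
  have h1 := tri_two n
  have h2 := tri_two (n + 1)
  have h3 : (n + 1) * (n + 1 + 1) = n * (n + 1) + 2 * (n + 1) := by ring
  omega

theorem tri_le_tri {m n : Int} (h0 : 0 ≤ m) (h : m ≤ n) : tri m ≤ tri n := by
  have h1 := tri_two m
  have h2 := tri_two n
  nlinarith

-- the group index is unique
theorem tri_unique {a b X : Int} (ha : 0 ≤ a) (hb : 0 ≤ b)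
    (h1 : tri a ≤ X) (h2 : X < tri (a + 1)) (h3 : tri b ≤ X) (h4 : X < tri (b + 1)) :
    a = b := by
  rcases lt_trichotomy a b with h | h | h
  · have := tri_le_tri (by omega) (show a + 1 ≤ b by omega)
    omega
  · exact h
  · have := tri_le_tri (by omega) (show b + 1 ≤ a by omega)
    omega

theorem six_dvd (m : Int) : (6 : Int) ∣ m * (m + 1) * (2 * m + 1) := by
  have h6 : m % 6 = 0 ∨ m % 6 = 1 ∨ m % 6 = 2 ∨ m % 6 = 3 ∨ m % 6 = 4 ∨ m % 6 = 5 := by omega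
  rcases h6 with h | h | h | h | h | h
  · obtain ⟨q, hq⟩ : ∃ q, m = 6 * q := ⟨m / 6, by omega⟩
    exact ⟨q * (6 * q + 1) * (12 * q + 1), by subst hq; ring⟩
  · obtain ⟨q, hq⟩ : ∃ q, m = 6 * q + 1 := ⟨m / 6, by omega⟩
    exact ⟨(6 * q + 1) * (3 * q + 1) * (4 * q + 1), by subst hq; ring⟩
  · obtain ⟨q, hq⟩ : ∃ q, m = 6 * q + 2 := ⟨m / 6, by omega⟩
    exact ⟨(3 * q + 1) * (2 * q + 1) * (12 * q + 5), by subst hq; ring⟩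
  · obtain ⟨q, hq⟩ : ∃ q, m = 6 * q + 3 := ⟨m / 6, by omega⟩
    exact ⟨(2 * q + 1) * (3 * q + 2) * (12 * q + 7), by subst hq; ring⟩
  · obtain ⟨q, hq⟩ : ∃ q, m = 6 * q + 4 := ⟨m / 6, by omega⟩
    exact ⟨(3 * q + 2) * (6 * q + 5) * (4 * q + 3), by subst hq; ring⟩
  · obtain ⟨q, hq⟩ : ∃ q, m = 6 * q + 5 := ⟨m / 6, by omega⟩
    exact ⟨(6 * q + 5) * (q + 1) * (12 * q + 11), by subst hq; ring⟩

theorem sumsq_six (m : Int) : 6 * sumsq m = m * (m + 1) * (2 * m + 1) := by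
  unfold sumsq
  rw [PySem.Int.floordiv_eq_ediv_of_pos (by norm_num)]
  exact Int.mul_ediv_cancel' (six_dvd m)

theorem sumsq_succ (n : Int) : sumsq (n + 1) = sumsq n + (n + 1) ^ 2 := by
  have h1 := sumsq_six n
  have h2 := sumsq_six (n + 1)
  have h3 : (n + 1) * (n + 1 + 1) * (2 * (n + 1) + 1)
      = n * (n + 1) * (2 * n + 1) + 6 * (n + 1) ^ 2 := by ring
  omega

theorem gallop_spec (x hi : Int) (h : 0 < hi) :
    0 < gallop x hi ∧ hi ≤ gallop x hi ∧ x < tri (gallop x hi) := by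
  fun_induction gallop x hi with
  | case1 hi hc ih =>
    have := ih (by omega)
    refine ⟨this.1, by omega, this.2.2⟩
  | case2 hi hc =>
    refine ⟨h, le_refl _, by omega⟩

theorem bsearch_spec (x lo hi : Int) :
    0 < lo → lo < hi → tri lo ≤ x → x < tri hi →
    tri (bsearch x lo hi) ≤ x ∧ x < tri (bsearch x lo hi + 1) ∧ lo ≤ bsearch x lo hi := by
  fun_induction bsearch x lo hi with
  | case1 lo hi hgt mid hcond ih =>
    intro hlo hlh htl hth
    have hm : mid = (lo + hi) / 2 := PySem.Int.floordiv_eq_ediv_of_pos (by norm_num)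
    have hb1 : lo < mid := by omega
    have hb2 : mid < hi := by omega
    have := ih (by omega) hb2 hcond hth
    refine ⟨this.1, this.2.1, by omega⟩
  | case2 lo hi hgt mid hcond ih =>
    intro hlo hlh htl hth
    have hm : mid = (lo + hi) / 2 := PySem.Int.floordiv_eq_ediv_of_pos (by norm_num)
    have hb1 : lo < mid := by omega
    exact ih hlo hb1 htl (by omega)
  | case3 lo hi hgt =>
    intro hlo hlh htl hth
    have : hi = lo + 1 := by omega
    exact ⟨htl, by rw [← this]; exact hth, le_refl _⟩

-- closed form of A's loop: if the remaining x equals X - tri(t-1) and m is the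
-- group index of X, the loop adds the remaining squares plus the partial group
theorem funcLoop_eq (x t r X m : Int) :
    1 ≤ t → 0 ≤ x → x = X - tri (t - 1) → 0 ≤ m → tri m ≤ X → X < tri (m + 1) →
    funcLoop x t r = r + (sumsq m - sumsq (t - 1)) + (m + 1) * (X - tri m) := by
  fun_induction funcLoop x t r with
  | case1 x t r h1 h2 =>
    -- 0 < x, x < t : last (partial) group, m = t - 1
    intro ht hx hX hm htm hXm
    have h4 : tri (t - 1) < X := by omega
    have h5 : X < tri t := by
      have := tri_succ (t - 1)
      simp only [sub_add_cancel] at this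
      omega
    have heq : m = t - 1 := tri_unique hm (by omega) htm hXm (le_of_lt h4)
      (by simpa using h5)
    rw [heq, hX]; ring
  | case2 x t r h1 h2 ih =>
    -- x ≥ t : a full group of t² ones
    intro ht hx hX hm htm hXm
    have htri : tri (t + 1 - 1) = tri (t - 1) + t := by
      have := tri_succ (t - 1)
      simp only [sub_add_cancel] at this
      simpa using this
    have hss : sumsq t = sumsq (t - 1) + t ^ 2 := by
      have := sumsq_succ (t - 1)
      simp only [sub_add_cancel] at this
      simpa using this
    have := ih (by omega) (by omega) (by omega) hm htm hXm
    rw [this]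
    have hss' : sumsq (t + 1 - 1) = sumsq (t - 1) + t ^ 2 := by
      simpa using hss
    rw [hss']; ring
  | case3 x t r h1 =>
    -- x ≤ 0 : x = 0, X = tri(t-1), m = t - 1, nothing to add
    intro ht hx hX hm htm hXm
    have hx0 : x = 0 := by omega
    have hXeq : X = tri (t - 1) := by omega
    have h5 : X < tri t := by
      have h6 := tri_succ (t - 1)
      simp only [sub_add_cancel] at h6
      have h7 := tri_two (t - 1)
      omega
    have heq : m = t - 1 := tri_unique hm (by omega) htm hXm (le_of_eq hXeq.symm)
      (by simpa using h5)
    rw [heq, show X - tri (t - 1) = 0 by omega]; ring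

-- ===== VERDICT (by name: the statement is the Claim_ definition above) =====
theorem func_spec : Claim_equal_func := by
  intro x _
  unfold Spec_func func func_alt
  by_cases hx : x ≤ 1
  · simp [hx]
  · simp only [hx, if_false]
    have hx2 : 2 ≤ x := by omega
    obtain ⟨hg1, hg2, hg3⟩ := gallop_spec x 2 (by norm_num)
    obtain ⟨hb1, hb2, hb3⟩ := bsearch_spec x 1 (gallop x 2) (by norm_num) (by omega)
      (by rw [show tri 1 = (1:Int) from by decide]; omega) hg3
    have := funcLoop_eq x 1 0 x (bsearch x 1 (gallop x 2)) (le_refl _) (by omega)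
      (by norm_num [show tri 0 = (0:Int) from by decide]) (by omega) hb1 hb2
    rw [this]
    have hz : sumsq (1 - 1) = 0 := by decide
    rw [hz]; ring
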